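-- pv_equiv track=rewrite | github.com/Pablo-Proy/Coding-Challenges | OperationsOnStrings/text_predictor.py | text_predictor
-- ===== SOURCE A (Python) =====
-- def text_predictor(repository,costumer_query):
--
--     """
--     This function returns a maximun of three suggested words (from a given repository) after each character of a keyword is typed by the costumer in the "search field".
--
--     If there are more than three aceptable keywords, the functions returns the words that are first in alphabetical order. Furthermore,
--     the function starts suggesting keywords after the costumer has entered at least two characters.
--     """
--     repository=[word.lower() for word in repository]
--     repository.sort()
--     costumer_query=costumer_query.lower()
--     sugested_words=[]
--
--     for i in range(1,len(costumer_query)):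
--
--         substring=costumer_query[:i+1]
--         temporary_sugested_words=[]
--         cont=0
--
--         for word in repository:
--
--             if word.find(substring)==0 and len(temporary_sugested_words)<3:
--
--                 temporary_sugested_words.append(word)
--                 cont+=1
--
--         sugested_words.append(temporary_sugested_words)
--
--     return sugested_words
-- ===== SOURCE B (Python) =====
-- def text_predictor(repository, costumer_query):
--     words = sorted(word.lower() for word in repository)
--     query = costumer_query.lower()
--     suggested = []
--     for end in range(2, len(query) + 1):
--         prefix = query[:end]
--         # binary search (bisect_left) for the first word >= prefix
--         lo, hi = 0, len(words)
--         while lo < hi: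
--             mid = (lo + hi) // 2
--             if words[mid] < prefix:
--                 lo = mid + 1
--             else:
--                 hi = mid
--         block = []
--         for word in words[lo:lo + 3]:
--             if word.startswith(prefix):
--                 block.append(word)
--         suggested.append(block)
--     return suggested
-- ===== Notes on version B (the rewrite author's own statement) =====
-- stated objective: faster
-- what changed: Instead of scanning the whole sorted repository for every prefix, B binary-searches (hand-rolled bisect_left) for the first word >= the prefix and filters just the 3-word slice starting there.
import Mathlib
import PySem

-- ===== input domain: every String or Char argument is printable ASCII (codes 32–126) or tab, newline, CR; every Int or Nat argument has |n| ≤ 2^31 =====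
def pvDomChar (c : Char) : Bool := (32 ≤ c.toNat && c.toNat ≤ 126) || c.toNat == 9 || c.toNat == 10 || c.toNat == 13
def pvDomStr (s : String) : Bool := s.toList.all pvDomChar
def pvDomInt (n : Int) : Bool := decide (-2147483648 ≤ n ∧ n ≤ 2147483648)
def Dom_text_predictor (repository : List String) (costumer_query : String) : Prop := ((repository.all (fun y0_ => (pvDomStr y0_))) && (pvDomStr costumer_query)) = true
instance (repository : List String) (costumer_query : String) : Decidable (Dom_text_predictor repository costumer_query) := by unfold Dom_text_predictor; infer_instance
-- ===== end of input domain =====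

-- B replaces A's per-prefix linear scan of the sorted repository by a binary search for the
-- first word ≥ the prefix followed by a filter of the 3-word slice there (return value only).

-- ===== PORT A =====
def text_predictor (repository : List String) (costumer_query : String) : List (List String) :=
  let repository := repository.map PySem.Str.lower
  let repository := PySem.List.sorted repository (fun w => w)
  let costumer_query := PySem.Str.lower costumer_query
  let sugested_words : List (List String) := []
  (PySem.List.pyRange 1 (PySem.Str.len costumer_query) 1).foldl (fun sugested_words i =>
    let substring := PySem.Str.slice costumer_query none (some (i + 1))
    let r := repository.foldl (fun (st : List String × Int) word =>
      if PySem.Str.find word substring = 0 ∧ st.1.length < 3 then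
        (st.1 ++ [word], st.2 + 1)
      else st) ([], 0)
    sugested_words ++ [r.1]) sugested_words

-- ===== PORT B =====
-- hand-rolled bisect_left from Source B: the while loop becomes fuel recursion (fuel = hi - lo bounds the iterations)
def tpBisectLoop (words : List String) (pre : String) : Nat → Nat → Nat → Nat
  | 0, lo, _ => lo
  | fuel + 1, lo, hi =>
      if lo < hi then
        let mid := (lo + hi) / 2
        if PySem.List.pyGetD words (mid : Int) "" < pre then tpBisectLoop words pre fuel (mid + 1) hi
        else tpBisectLoop words pre fuel lo mid
      else lo

def tpBisect (words : List String) (pre : String) (lo hi : Nat) : Nat :=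
  tpBisectLoop words pre (hi - lo) lo hi

def text_predictor_alt (repository : List String) (costumer_query : String) : List (List String) :=
  let words := PySem.List.sorted (repository.map PySem.Str.lower) (fun w => w)
  let query := PySem.Str.lower costumer_query
  (PySem.List.pyRange 2 (PySem.Str.len query + 1) 1).foldl (fun suggested e =>
    let pre := PySem.Str.slice query none (some e)
    let lo := tpBisect words pre 0 words.length
    let block := (PySem.List.slice words (some (lo : Int)) (some ((lo : Int) + (3 : Nat)))).foldl
      (fun block word => if PySem.Str.startswith word pre then block ++ [word] else block) []
    suggested ++ [block]) []

-- ===== PRECONDITION & SPEC =====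
def Spec_text_predictor (repository : List String) (costumer_query : String) (out : List (List String)) : Prop := out = text_predictor_alt repository costumer_query
instance (repository : List String) (costumer_query : String) (out : List (List String)) : Decidable (Spec_text_predictor repository costumer_query out) := by unfold Spec_text_predictor; infer_instance

-- ===== CLAIM (what is proved, stated in full; the proofs are below) =====
def Claim_equal_text_predictor : Prop := ∀ (repository : List String) (costumer_query : String), Dom_text_predictor repository costumer_query → Spec_text_predictor repository costumer_query (text_predictor repository costumer_query)

-- ===== LEMMAS AND PROOFS =====

-- word.find(p) == 0 is exactly word.startswith(p)
lemma tp_go_ne_zero (p : List Char) : ∀ (t : List Char) (x : Nat), PySem.Chars.find.go p t (x + 1) ≠ 0 := by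
  intro t
  induction t with
  | nil => intro x; rw [PySem.Chars.find.go.eq_1]; split
           · omega
           · omega
  | cons h t ih =>
      intro x; rw [PySem.Chars.find.go.eq_2]; split
      · omega
      · exact ih (x + 1)

lemma tp_find_zero_iff (w p : String) :
    PySem.Str.find w p = 0 ↔ PySem.Str.startswith w p = true := by
  rw [PySem.Str.find_eq, PySem.Str.startswith_eq, PySem.Chars.startswith_iff]
  show PySem.Chars.find.go _ _ 0 = 0 ↔ _
  cases hw : w.toList with
  | nil =>
      rw [PySem.Chars.find.go.eq_1]
      constructor
      · intro h; split at h <;> simp_all [List.isEmpty_iff, List.prefix_nil]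
      · intro h; simp [List.prefix_nil] at h; simp [h]
  | cons c t =>
      rw [PySem.Chars.find.go.eq_2]
      constructor
      · intro h; split at h
        · next hp => exact (List.isPrefixOf_iff_prefix).1 hp
        · exact absurd h (tp_go_ne_zero _ t 0)
      · intro h
        have : p.toList.isPrefixOf (c :: t) = true := (List.isPrefixOf_iff_prefix).2 h
        simp [this]

-- A's inner loop collects the first (at most) 3 matching words
lemma tp_foldA (p : String) : ∀ (ws : List String) (acc : List String) (c : Int), acc.length ≤ 3 →
    (ws.foldl (fun (st : List String × Int) word =>
      if PySem.Str.find word p = 0 ∧ st.1.length < 3 then (st.1 ++ [word], st.2 + 1) else st)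
      (acc, c)).1
    = acc ++ (ws.filter (fun w => PySem.Str.startswith w p)).take (3 - acc.length) := by
  intro ws
  induction ws with
  | nil => intro acc c _; simp
  | cons w t ih =>
      intro acc c hle
      by_cases hsw : PySem.Str.startswith w p = true
      · have hfind : PySem.Str.find w p = 0 := (tp_find_zero_iff w p).2 hsw
        by_cases h3 : acc.length < 3
        · have hc : PySem.Str.find w p = 0 ∧ acc.length < 3 := ⟨hfind, h3⟩
          simp only [List.foldl_cons, if_pos hc]
          rw [ih (acc ++ [w]) (c + 1) (by simp; omega)]
          have h1 : 3 - acc.length = (3 - (acc.length + 1)) + 1 := by omega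
          have hswc : PySem.Chars.startswith w.toList p.toList = true := by simpa using hsw
          simp [List.filter_cons, hswc, h1, List.take_succ_cons]
        · have h0 : 3 - acc.length = 0 := by omega
          have hc : ¬ (PySem.Str.find w p = 0 ∧ acc.length < 3) := fun h => h3 h.2
          simp only [List.foldl_cons, if_neg hc]
          rw [ih acc c hle]
          simp [List.filter_cons, h0]
      · have hc : ¬ (PySem.Str.find w p = 0 ∧ acc.length < 3) :=
          fun h => hsw ((tp_find_zero_iff w p).1 h.1)
        simp only [List.foldl_cons, if_neg hc]
        rw [ih acc c hle]
        have hswc : ¬ PySem.Chars.startswith w.toList p.toList = true := by simpa using hsw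
        simp [List.filter_cons, hswc]

-- lexicographic order on char lists: a prefix is ≤ the whole word
lemma tp_prefix_not_lt : ∀ (p w : List Char), p <+: w → ¬ w < p := by
  intro p
  induction p with
  | nil => intro w _; exact List.not_lt_nil w
  | cons c p' ih =>
      intro w hpre
      obtain ⟨t, ht⟩ := hpre
      cases w with
      | nil => simp at ht
      | cons a w' =>
          rw [List.cons_append] at ht
          injection ht with he hw
          subst he
          intro hlt
          rcases List.cons_lt_cons_iff.1 hlt with h | ⟨-, h⟩
          · exact lt_irrefl _ h
          · exact ih w' ⟨t, hw⟩ h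

-- sandwich: p ≤ x ≤ y and p is a prefix of y ⇒ p is a prefix of x
lemma tp_sandwich : ∀ (p x y : List Char), ¬ x < p → ¬ y < x → p <+: y → p <+: x := by
  intro p
  induction p with
  | nil => intro x y _ _ _; exact List.nil_prefix
  | cons c p' ih =>
      intro x y hxp hyx hpre
      obtain ⟨t, ht⟩ := hpre
      cases y with
      | nil => simp at ht
      | cons b y' =>
          rw [List.cons_append] at ht
          injection ht with he hy
          subst he
          cases x with
          | nil => exact absurd (List.nil_lt_cons _ _) hxp
          | cons a x' =>
              rcases lt_trichotomy a c with h | rfl | h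
              · exact absurd (List.cons_lt_cons_iff.2 (Or.inl h)) hxp
              · have h1 : ¬ x' < p' := fun h => hxp (List.cons_lt_cons_iff.2 (Or.inr ⟨rfl, h⟩))
                have h2 : ¬ y' < x' := fun h => hyx (List.cons_lt_cons_iff.2 (Or.inr ⟨rfl, h⟩))
                obtain ⟨u, hu⟩ := ih x' y' h1 h2 ⟨t, hy⟩
                exact ⟨u, by rw [List.cons_append, hu]⟩
              · exact absurd (List.cons_lt_cons_iff.2 (Or.inl h)) hyx

lemma tp_str_lt_iff (s t : String) : s < t ↔ s.toList < t.toList := String.lt_iff_toList_lt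

lemma tp_startswith_not_lt (w p : String) (h : PySem.Str.startswith w p = true) : ¬ w < p := by
  rw [PySem.Str.startswith_eq, PySem.Chars.startswith_iff] at h
  rw [tp_str_lt_iff]
  exact tp_prefix_not_lt _ _ h

-- in a sorted list of words all ≥ p, the words starting with p form an initial run
lemma tp_filter_eq_takeWhile (p : String) : ∀ (l : List String), l.Pairwise (· ≤ ·) →
    (∀ w ∈ l, ¬ w < p) →
    l.filter (fun w => PySem.Str.startswith w p) = l.takeWhile (fun w => PySem.Str.startswith w p) := by
  intro l
  induction l with
  | nil => intro _ _; rfl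
  | cons h t ih =>
      intro hp hge
      rcases List.pairwise_cons.1 hp with ⟨hhead, htail⟩
      by_cases hsw : PySem.Str.startswith h p = true
      · rw [List.filter_cons_of_pos (by simpa using hsw),
            List.takeWhile_cons_of_pos (by simpa using hsw),
            ih htail (fun w hw => hge w (List.mem_cons_of_mem _ hw))]
      · rw [List.filter_cons_of_neg (by simpa using hsw),
            List.takeWhile_cons_of_neg (by simpa using hsw)]
        refine List.filter_eq_nil_iff.2 (fun y hy hswy => ?_)
        have hswy' : PySem.Str.startswith y p = true := by simpa using hswy
        apply hsw
        have hpre : p.toList <+: h.toList := by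
          rw [PySem.Str.startswith_eq, PySem.Chars.startswith_iff] at hswy'
          refine tp_sandwich p.toList h.toList y.toList ?_ ?_ hswy'
          · rw [← tp_str_lt_iff]; exact hge h List.mem_cons_self
          · rw [← tp_str_lt_iff]; exact not_lt.2 (hhead y hy)
        rw [PySem.Str.startswith_eq, PySem.Chars.startswith_iff]
        exact hpre

-- binary-search specification
lemma tpBisect_spec (ws : List String) (p : String) (hs : ws.Pairwise (· ≤ ·)) :
    ∀ (lo hi : Nat), lo ≤ hi → hi ≤ ws.length →
    (∀ (j : Nat) (hj : j < ws.length), j < lo → ws[j] < p) →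
    (∀ (j : Nat) (hj : j < ws.length), hi ≤ j → ¬ ws[j] < p) →
    ∀ (fuel : Nat), hi - lo ≤ fuel →
    tpBisectLoop ws p fuel lo hi ≤ ws.length ∧
    (∀ (j : Nat) (hj : j < ws.length), j < tpBisectLoop ws p fuel lo hi → ws[j] < p) ∧
    (∀ (j : Nat) (hj : j < ws.length), tpBisectLoop ws p fuel lo hi ≤ j → ¬ ws[j] < p) := by
  intro lo hi hlohi hhi hlo' hhi' fuel
  induction fuel generalizing lo hi with
  | zero =>
      intro hfuel
      have hle : lo = hi := by omega
      subst hle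
      rw [show tpBisectLoop ws p 0 lo lo = lo from rfl]
      exact ⟨hhi, fun j hj hjl => hlo' j hj hjl, fun j hj hl => hhi' j hj hl⟩
  | succ fuel ih =>
      intro hfuel
      by_cases hlt : lo < hi
      · rw [tpBisectLoop, if_pos hlt]
        have hmid : (lo + hi) / 2 < ws.length := by omega
        have hmem : PySem.List.pyGetD ws (((lo + hi) / 2 : Nat) : Int) "" = ws[(lo + hi) / 2] := by
          rw [PySem.List.pyGetD_natCast]; exact List.getD_eq_getElem _ _ hmid
        by_cases hmidlt : PySem.List.pyGetD ws (((lo + hi) / 2 : Nat) : Int) "" < p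
        · rw [if_pos hmidlt]
          refine ih ((lo + hi) / 2 + 1) hi (by omega) hhi ?_ hhi' (by omega)
          intro j hj hjlt
          rcases Nat.lt_or_ge j ((lo + hi) / 2) with h | h
          · exact lt_of_le_of_lt (List.pairwise_iff_getElem.1 hs j _ hj hmid h) (hmem ▸ hmidlt)
          · have : j = (lo + hi) / 2 := by omega
            subst this; rw [← hmem]; exact hmidlt
        · rw [if_neg hmidlt]
          refine ih lo ((lo + hi) / 2) (by omega) (by omega) hlo' ?_ (by omega)
          intro j hj hmj hcon
          apply hmidlt
          rw [hmem]
          rcases Nat.lt_or_ge ((lo + hi) / 2) j with h | h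
          · exact lt_of_le_of_lt (List.pairwise_iff_getElem.1 hs _ j hmid hj h) hcon
          · have : (lo + hi) / 2 = j := by omega
            subst this; exact hcon
      · rw [tpBisectLoop, if_neg hlt]
        have hle : lo = hi := by omega
        subst hle
        exact ⟨hhi, fun j hj hjl => hlo' j hj hjl, fun j hj hl => hhi' j hj hl⟩

lemma tp_foldl_append_map {α β : Type} (f : α → β) : ∀ (l : List α) (acc : List β),
    l.foldl (fun acc x => acc ++ [f x]) acc = acc ++ l.map f := by
  intro l
  induction l with
  | nil => intro acc; simp
  | cons x t ih => intro acc; simp [ih]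

-- the heart: A's capped scan and B's bisect-slice-filter agree on a sorted word list
lemma tp_inner (ws : List String) (p : String) (hs : ws.Pairwise (· ≤ ·)) :
    (ws.foldl (fun (st : List String × Int) word =>
      if PySem.Str.find word p = 0 ∧ st.1.length < 3 then (st.1 ++ [word], st.2 + 1) else st)
      ([], 0)).1
    =
    (PySem.List.slice ws (some ((tpBisect ws p 0 ws.length : Nat) : Int))
        (some (((tpBisect ws p 0 ws.length : Nat) : Int) + ((3 : Nat) : Int)))).foldl
      (fun block word => if PySem.Str.startswith word p then block ++ [word] else block) [] := by
  rw [tpBisect]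
  set lo := tpBisectLoop ws p (ws.length - 0) 0 ws.length with hlo
  obtain ⟨hloLen, hlt, hge⟩ := tpBisect_spec ws p hs 0 ws.length (Nat.zero_le _) le_rfl
    (fun j hj h => absurd h (Nat.not_lt_zero j)) (fun j hj h => absurd hj (by omega))
    (ws.length - 0) le_rfl
  rw [tp_foldA p ws [] 0 (by simp), PySem.List.slice_natCast_add,
      PySem.List.foldl_append_if_eq_filter]
  simp only [List.nil_append, List.length_nil, Nat.sub_zero]
  -- words before index lo do not start with p
  have hfilter_take : (ws.take lo).filter (fun w => PySem.Str.startswith w p) = [] := by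
    refine List.filter_eq_nil_iff.2 (fun w hw hsww => ?_)
    obtain ⟨j, hj, hjw⟩ := List.mem_iff_getElem.1 hw
    have hjlo : j < lo := by have := hj; simp [List.length_take] at this; omega
    have hjlen : j < ws.length := by have := hj; simp [List.length_take] at this; omega
    have : ws[j] < p := hlt j hjlen hjlo
    have hnot : ¬ w < p := tp_startswith_not_lt w p (by simpa using hsww)
    rw [List.getElem_take] at hjw
    exact hnot (hjw ▸ this)
  have hdropge : ∀ w ∈ ws.drop lo, ¬ w < p := by
    intro w hw
    obtain ⟨j, hj, hjw⟩ := List.mem_iff_getElem.1 hw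
    rw [List.getElem_drop] at hjw
    have hlen : lo + j < ws.length := by have := hj; simp [List.length_drop] at this; omega
    exact hjw ▸ hge (lo + j) hlen (Nat.le_add_right _ _)
  have hsplit : ws.filter (fun w => PySem.Str.startswith w p)
      = (ws.drop lo).filter (fun w => PySem.Str.startswith w p) := by
    conv_lhs => rw [← List.take_append_drop lo ws]
    rw [List.filter_append, hfilter_take, List.nil_append]
  rw [hsplit,
      tp_filter_eq_takeWhile p (ws.drop lo) (hs.drop) hdropge,
      tp_filter_eq_takeWhile p ((ws.drop lo).take 3)
        (List.Pairwise.sublist (List.take_sublist 3 _) hs.drop)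
        (fun w hw => hdropge w (List.mem_of_mem_take hw)),
      List.take_takeWhile]

-- ===== VERDICT (by name: the statement is the Claim_ definition above) =====
set_option maxHeartbeats 2000000 in
theorem text_predictor_spec : Claim_equal_text_predictor := by
  intro repository q _
  show text_predictor repository q = text_predictor_alt repository q
  rw [text_predictor, text_predictor_alt]
  rw [tp_foldl_append_map, tp_foldl_append_map,
      PySem.List.pyRange_one, PySem.List.pyRange_one, List.map_map, List.map_map]
  have hn : ((PySem.Str.len (PySem.Str.lower q) + 1 - 2 : Int)).toNat
      = ((PySem.Str.len (PySem.Str.lower q) - 1 : Int)).toNat := by omega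
  rw [hn]
  refine List.map_congr_left (fun k _ => ?_)
  simp only [Function.comp]
  have hq : (1 : Int) + (k : Int) + 1 = 2 + (k : Int) := by ring
  rw [hq]
  have hpw := PySem.List.sorted_pairwise (repository.map PySem.Str.lower) (fun w => w)
  exact tp_inner _ _ (by simpa using hpw)
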